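-- pv_equiv track=rewrite | github.com/facup94/EulerProjectPython | Scripts/54.py | two_pairs
-- ===== SOURCE A (Python) =====
-- def two_pairs(cards):
--     values_set = list(set(cards))
--     cantidad = 0
--     for valueS in values_set:
--         count = 0
--         for value in cards:
--             if valueS == value: count += 1
--         if count == 2: cantidad += 1
--     if cantidad == 2: return True
--     return False
-- ===== SOURCE B (Python) =====
-- def two_pairs(cards):
--     freq = {}
--     for c in cards:
--         freq[c] = freq.get(c, 0) + 1
--     return sum(1 for n in freq.values() if n == 2) == 2
-- ===== Notes on version B (the rewrite author's own statement) =====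
-- stated objective: faster
-- what changed: Replaces A's set-then-rescan (for each distinct value, rescan the whole list to count it) with one frequency-dict build pass plus a single pass over the tallies.
import Mathlib
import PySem

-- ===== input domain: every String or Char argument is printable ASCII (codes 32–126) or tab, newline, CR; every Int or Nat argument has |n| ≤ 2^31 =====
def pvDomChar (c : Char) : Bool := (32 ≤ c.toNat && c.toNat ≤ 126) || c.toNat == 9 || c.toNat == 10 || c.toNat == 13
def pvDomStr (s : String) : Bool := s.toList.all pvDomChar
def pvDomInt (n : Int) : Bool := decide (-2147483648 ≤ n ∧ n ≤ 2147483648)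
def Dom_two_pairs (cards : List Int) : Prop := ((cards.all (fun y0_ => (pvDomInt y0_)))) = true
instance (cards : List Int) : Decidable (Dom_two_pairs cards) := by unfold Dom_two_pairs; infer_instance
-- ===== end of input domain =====

-- B replaces A's per-distinct-value rescan of the list with one frequency-dict build pass
-- plus a single pass over the tallies (objective: faster).

-- ===== PORT A =====
-- values_set = list(set(cards)); for each valueS, rescan cards counting matches; tally counts equal to 2
def two_pairs (cards : List Int) : Bool :=
  let values_set := PySem.Set.ofList cards
  let cantidad :=
    values_set.foldl (fun cantidad valueS =>
      let count := cards.foldl (fun count value => if valueS == value then count + 1 else count) (0 : Int)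
      if count == 2 then cantidad + 1 else cantidad) (0 : Int)
  if cantidad == 2 then true else false

-- ===== PORT B =====
-- freq = {}; for c in cards: freq[c] = freq.get(c, 0) + 1; return sum(1 for n in freq.values() if n == 2) == 2
def two_pairs_alt (cards : List Int) : Bool :=
  let freq := cards.foldl (fun d c => d.insert c (d.getD c 0 + 1)) (PySem.Dict.empty : PySem.Dict Int Int)
  (freq.values.foldl (fun s n => if n == 2 then s + 1 else s) (0 : Int)) == 2

-- ===== PRECONDITION & SPEC =====
def Spec_two_pairs (cards : List Int) (out : Bool) : Prop := out = two_pairs_alt cards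
instance (cards : List Int) (out : Bool) : Decidable (Spec_two_pairs cards out) := by unfold Spec_two_pairs; infer_instance

-- ===== CLAIM (what is proved, stated in full; the proofs are below) =====
def Claim_equal_two_pairs : Prop := ∀ (cards : List Int), Dom_two_pairs cards → Spec_two_pairs cards (two_pairs cards)

-- ===== LEMMAS AND PROOFS =====

-- A's side: the nested loops compute the number of distinct values occurring exactly twice
theorem two_pairs_count (cards : List Int) :
    (PySem.Set.ofList cards).foldl (fun cantidad valueS =>
      let count := cards.foldl (fun count value => if valueS == value then count + 1 else count) (0 : Int)
      if count == 2 then cantidad + 1 else cantidad) (0 : Int)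
    = ((PySem.Set.ofList cards).countP (fun v => (cards.count v : Int) == 2) : Int) := by
  have h : ∀ (l : List Int) (a : Int),
      l.foldl (fun cantidad valueS =>
        let count := cards.foldl (fun count value => if valueS == value then count + 1 else count) (0 : Int)
        if count == 2 then cantidad + 1 else cantidad) a
      = a + (l.countP (fun v => (cards.count v : Int) == 2) : Int) := by
    intro l
    induction l with
    | nil => intro a; simp
    | cons x xs ih =>
      intro a
      simp only [List.foldl_cons, List.countP_cons, ih]
      have hc : ∀ value : Int, (x == value) = (value == x) := fun v => by
        by_cases h : x = v <;> simp [h, eq_comm]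
      simp only [hc]
      rw [PySem.List.foldl_beq_add_one]
      by_cases hx : ((cards.count x : Int) == 2) = true <;> simp [hx] <;> push_cast <;> ring
  rw [h]; simp

-- B's side: the tally loop over the counter's values computes the same number
theorem two_pairs_alt_count (cards : List Int) :
    ((cards.foldl (fun d c => d.insert c (d.getD c 0 + 1)) (PySem.Dict.empty : PySem.Dict Int Int)).values.foldl
      (fun s n => if n == 2 then s + 1 else s) (0 : Int))
    = ((PySem.Set.ofList cards).countP (fun v => (cards.count v : Int) == 2) : Int) := by
  rw [PySem.Dict.foldl_insert_getD_add_one_eq_counter]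
  have hv : (PySem.Dict.counter cards).values
      = (PySem.Set.ofList cards).map (fun k => (cards.count k : Int)) := by
    have := PySem.Dict.items_counter (xs := cards)
    simp only [PySem.Dict.values, this, List.map_map]
    rfl
  rw [hv, PySem.List.foldl_if_add_one]
  simp [List.countP_map, Function.comp_def]

-- ===== VERDICT (by name: the statement is the Claim_ definition above) =====
theorem two_pairs_spec : Claim_equal_two_pairs := by
  intro cards _
  unfold Spec_two_pairs two_pairs two_pairs_alt
  simp only [two_pairs_count, two_pairs_alt_count]
  by_cases h : (((PySem.Set.ofList cards).countP (fun v => (cards.count v : Int) == 2) : Int) == 2) = true <;>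
    simp [h]
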